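-- pv_equiv track=rewrite | github.com/eformat/wordbeez-docker | wordswarm-agent/src/wordswarm_agent/graph.py | find_adjacency_order
-- ===== SOURCE A (Python) =====
-- ADJ: list[list[int]] = [
--     [1, 4, 3],              # 0
--     [0, 4, 5, 2],           # 1
--     [1, 5, 6],              # 2
--     [0, 4, 7],              # 3
--     [0, 3, 7, 8, 5, 1],     # 4
--     [1, 4, 8, 9, 6, 2],     # 5
--     [2, 5, 9],              # 6
--     [3, 10, 11, 8, 4],      # 7
--     [4, 7, 11, 12, 9, 5],   # 8
--     [5, 8, 12, 13, 6],      # 9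
--     [7, 11, 14],            # 10
--     [7, 10, 14, 15, 12, 8], # 11
--     [8, 11, 15, 16, 13, 9], # 12
--     [9, 12, 16],            # 13
--     [10, 11, 15],           # 14
--     [14, 11, 12, 16],       # 15
--     [13, 12, 15],           # 16
-- ]
--
-- def find_adjacency_order(cells: list[int]) -> list[int] | None:
--     """
--     Given a set of cells, find an ordering that forms a valid adjacency path.
--     Uses backtracking DFS. Returns None if no valid ordering exists.
--     """
--     if len(cells) <= 1:
--         return list(cells)
--
--     cell_set = set(cells)
--
--     def backtrack(path: list[int], remaining: set[int]) -> list[int] | None: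
--         if not remaining:
--             return path
--         last = path[-1]
--         for neighbor in ADJ[last]:
--             if neighbor in remaining:
--                 new_remaining = remaining - {neighbor}
--                 result = backtrack(path + [neighbor], new_remaining)
--                 if result is not None:
--                     return result
--         return None
--
--     # Try starting from each cell
--     for start in cells:
--         result = backtrack([start], cell_set - {start})
--         if result is not None:
--             return result
--
--     return None
-- ===== SOURCE B (Python) =====
-- ADJ: list[list[int]] = [
--     [1, 4, 3],              # 0
--     [0, 4, 5, 2],           # 1
--     [1, 5, 6],              # 2
--     [0, 4, 7],              # 3
--     [0, 3, 7, 8, 5, 1],     # 4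
--     [1, 4, 8, 9, 6, 2],     # 5
--     [2, 5, 9],              # 6
--     [3, 10, 11, 8, 4],      # 7
--     [4, 7, 11, 12, 9, 5],   # 8
--     [5, 8, 12, 13, 6],      # 9
--     [7, 11, 14],            # 10
--     [7, 10, 14, 15, 12, 8], # 11
--     [8, 11, 15, 16, 13, 9], # 12
--     [9, 12, 16],            # 13
--     [10, 11, 15],           # 14
--     [14, 11, 12, 16],       # 15
--     [13, 12, 15],           # 16
-- ]
--
-- def find_adjacency_order(cells: list[int]) -> list[int] | None:
--     """DFS on (last, remaining) subproblems with memoized dead ends: no path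
--     accumulator is threaded; the ordering is assembled back-to-front from the
--     recursion, and each (last, remaining-set) state is explored at most once,
--     preserving the exact DFS order (and hence the exact result) of the naive
--     path-accumulating search."""
--     if len(cells) <= 1:
--         return list(cells)
--
--     cell_set = set(cells)
--     failed = set()  # (last, remaining as sorted tuple) states known to be dead ends
--
--     def solve(last, remaining):
--         # an adjacency ordering of {last} | remaining that starts at last, or None
--         if not remaining:
--             return [last]
--         key = (last, remaining)
--         if key in failed:
--             return None
--         for neighbor in ADJ[last]:
--             if neighbor in remaining:
--                 sub = solve(neighbor, tuple(x for x in remaining if x != neighbor))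
--                 if sub is not None:
--                     return [last] + sub
--         failed.add(key)
--         return None
--
--     for start in cells:
--         result = solve(start, tuple(sorted(cell_set - {start})))
--         if result is not None:
--             return result
--
--     return None
-- ===== Notes on version B (the rewrite author's own statement) =====
-- stated objective: alternative
-- what changed: B replaces A's path-accumulating backtracking with a recursion on (last, remaining-set) subproblems that assembles the ordering back-to-front and memoizes dead-end states so each subproblem is explored at most once, preserving the exact DFS order and result; Pre_ excludes only inputs on which both programs raise IndexError (at least two distinct cells, one outside [-17, 16]).
import Mathlib
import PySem

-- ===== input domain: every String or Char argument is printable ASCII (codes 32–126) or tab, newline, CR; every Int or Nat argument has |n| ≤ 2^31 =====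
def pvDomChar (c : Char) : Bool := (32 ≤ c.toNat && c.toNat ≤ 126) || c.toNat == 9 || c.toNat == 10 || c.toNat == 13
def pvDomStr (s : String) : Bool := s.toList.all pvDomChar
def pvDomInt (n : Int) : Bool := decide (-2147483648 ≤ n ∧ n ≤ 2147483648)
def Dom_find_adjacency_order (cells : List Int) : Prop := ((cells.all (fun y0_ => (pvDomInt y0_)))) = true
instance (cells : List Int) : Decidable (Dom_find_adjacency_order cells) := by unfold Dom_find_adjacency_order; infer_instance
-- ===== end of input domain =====

-- B re-implements A's backtracking DFS with memoized dead-end (last, remaining-set) states,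
-- exploring each subproblem at most once while preserving the DFS order and exact result.

-- shared constant table (ADJ in the Python module)
def pvADJ : List (List Int) :=
  [[1, 4, 3], [0, 4, 5, 2], [1, 5, 6], [0, 4, 7], [0, 3, 7, 8, 5, 1],
   [1, 4, 8, 9, 6, 2], [2, 5, 9], [3, 10, 11, 8, 4], [4, 7, 11, 12, 9, 5],
   [5, 8, 12, 13, 6], [7, 11, 14], [7, 10, 14, 15, 12, 8], [8, 11, 15, 16, 13, 9],
   [9, 12, 16], [10, 11, 15], [14, 11, 12, 16], [13, 12, 15]]

-- shared accessors: path[-1] (path is always nonempty when read) and ADJ[last]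
-- (the getD defaults are totality guards only: out-of-range last = Python IndexError, outside Pre_)
def pvLast (path : List Int) : Int := (PySem.List.pyGet? path (-1)).getD 0
def pvRow (last : Int) : List Int := (PySem.List.pyGet? pvADJ last).getD []

-- ===== PORT A =====
-- A's backtrack: fuel (= number of recursion levels still allowed) is a totality guard;
-- the top call passes cells.length, which exceeds the recursion depth actually needed.
def pvBtA : Nat → List Int → List Int → Option (List Int)
  | 0, _, _ => none
  | f + 1, path, remaining =>
    if remaining = [] then some path
    else
      (pvRow (pvLast path)).findSome? (fun n =>
        if n ∈ remaining then pvBtA f (path ++ [n]) (PySem.Set.diff remaining [n]) else none)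

def find_adjacency_order (cells : List Int) : Option (List Int) :=
  if cells.length ≤ 1 then some cells
  else
    let cellSet : List Int := PySem.Set.ofList cells
    cells.findSome? (fun start => pvBtA cells.length [start] (PySem.Set.diff cellSet [start]))

-- ===== PORT B =====
-- B's solve: recursion on (last, remaining) — no path accumulator; the result is
-- assembled back-to-front as [last] ++ sub; threads the `failed` set of dead-end keys
-- (last, remaining); remaining is kept as a sorted tuple in Source B, so keys are
-- compared by plain equality. fuel is a totality guard exceeding the recursion depth.
mutual
def pvSolveB : Nat → Int → List Int → List (Int × List Int) →
    Option (List Int) × List (Int × List Int)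
  | 0, _, _, memo => (none, memo)
  | f + 1, last, remaining, memo =>
    if remaining = [] then (some [last], memo)
    else if (last, remaining) ∈ memo then (none, memo)
    else
      match pvLoopB f last remaining (pvRow last) memo with
      | (some r, m) => (some r, m)
      | (none, m) => (none, (last, remaining) :: m)
  termination_by f _ _ _ => (f, 0)

def pvLoopB : Nat → Int → List Int → List Int → List (Int × List Int) →
    Option (List Int) × List (Int × List Int)
  | _, _, _, [], memo => (none, memo)
  | f, last, remaining, n :: row, memo =>
    if n ∈ remaining then
      match pvSolveB f n (remaining.filter (fun x => x ≠ n)) memo with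
      | (some sub, m) => (some ([last] ++ sub), m)
      | (none, m) => pvLoopB f last remaining row m
    else pvLoopB f last remaining row memo
  termination_by f _ _ row _ => (f, row.length + 1)
end

def pvStartsB : List Int → List Int → Nat → List (Int × List Int) → Option (List Int)
  | [], _, _, _ => none
  | s :: rest, cellSet, fuel, memo =>
    match pvSolveB fuel s (PySem.List.sorted (PySem.Set.diff cellSet [s]) (fun x => x) false) memo with
    | (some r, _) => some r
    | (none, m) => pvStartsB rest cellSet fuel m

def find_adjacency_order_alt (cells : List Int) : Option (List Int) :=
  if cells.length ≤ 1 then some cells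
  else pvStartsB cells (PySem.Set.ofList cells) cells.length []

-- ===== PRECONDITION & SPEC =====
-- Pre_ excludes exactly the inputs on which the Python A raises IndexError: ADJ[last] is
-- evaluated with a cell outside Python's index range [-17, 16] of the 17-row table, which
-- happens iff the cells contain at least two distinct values, one of them out of range
-- (with a single distinct value the search finishes before any ADJ access); B raises
-- IndexError on exactly the same inputs.
def Pre_find_adjacency_order (cells : List Int) : Prop :=
  cells.length ≤ 1 ∨ (∀ c ∈ cells, -17 ≤ c ∧ c ≤ 16) ∨ (PySem.Set.ofList cells).length = 1
instance (cells : List Int) : Decidable (Pre_find_adjacency_order cells) := by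
  unfold Pre_find_adjacency_order; infer_instance

def pvWitness_find_adjacency_order : List Int := [0, 1, 2]

def Spec_find_adjacency_order (cells : List Int) (out : Option (List Int)) : Prop :=
  out = find_adjacency_order_alt cells
instance (cells : List Int) (out : Option (List Int)) : Decidable (Spec_find_adjacency_order cells out) := by
  unfold Spec_find_adjacency_order; infer_instance

-- ===== CLAIM (what is proved, stated in full; the proofs are below) =====
def Claim_equal_find_adjacency_order : Prop := ∀ (cells : List Int), Dom_find_adjacency_order cells → Pre_find_adjacency_order cells → Spec_find_adjacency_order cells (find_adjacency_order cells)

-- ===== LEMMAS AND PROOFS =====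

-- general Option/findSome? helpers
theorem pvFindSome?_congr {α β : Type} (f g : α → Option β) (l : List α)
    (h : ∀ x ∈ l, f x = g x) : l.findSome? f = l.findSome? g := by
  induction l with
  | nil => rfl
  | cons a t ih =>
    simp only [List.findSome?]
    rw [h a (by simp)]
    cases g a with
    | none => exact ih (fun x hx => h x (by simp [hx]))
    | some b => rfl

theorem pvMap_findSome? {α β γ : Type} (f : α → Option β) (g : β → γ) (l : List α) :
    (l.findSome? f).map g = l.findSome? (fun a => (f a).map g) := by
  induction l with
  | nil => rfl
  | cons a t ih =>
    simp only [List.findSome?]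
    cases f a <;> simp [ih]

theorem pvLast_append (p : List Int) (l : Int) : pvLast (p ++ [l]) = l := by
  simp [pvLast, PySem.List.pyGet?_neg_one]

theorem pvLast_single (l : Int) : pvLast [l] = l := by
  simp [pvLast, PySem.List.pyGet?_neg_one]

theorem pvDiff_length_lt {r : List Int} {n : Int} (h : n ∈ r) :
    (PySem.Set.diff r [n]).length < r.length := by
  simp only [PySem.Set.diff]
  exact List.length_filter_lt_length_iff_exists.mpr ⟨n, h, by simp⟩

-- fuel stability of A's search
theorem pvBtA_fuel (f₁ f₂ : Nat) (path r : List Int) (h₁ : r.length < f₁) (h₂ : r.length < f₂) :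
    pvBtA f₁ path r = pvBtA f₂ path r := by
  induction f₁ generalizing f₂ path r with
  | zero => omega
  | succ f ih =>
    cases f₂ with
    | zero => omega
    | succ g =>
      simp only [pvBtA]
      by_cases hr : r = []
      · simp [hr]
      · simp only [hr, if_false]
        refine pvFindSome?_congr _ _ _ (fun n _ => ?_)
        by_cases hn : n ∈ r
        · simp only [hn, if_true]
          exact ih g _ _ (by have := pvDiff_length_lt hn; omega)
            (by have := pvDiff_length_lt hn; omega)
        · simp [hn]

-- A's search depends on path only through its last element
theorem pvBtA_append (f : Nat) (p : List Int) (l : Int) (r : List Int) :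
    pvBtA f (p ++ [l]) r = (pvBtA f [l] r).map (p ++ ·) := by
  induction f generalizing p l r with
  | zero => rfl
  | succ f ih =>
    simp only [pvBtA]
    by_cases hr : r = []
    · simp [hr]
    · simp only [hr, if_false, pvLast_append, pvLast_single]
      rw [pvMap_findSome?]
      refine pvFindSome?_congr _ _ _ (fun n _ => ?_)
      by_cases hn : n ∈ r
      · simp only [hn, if_true]
        rw [ih (p ++ [l]) n, ih [l] n, Option.map_map]
        cases pvBtA f [n] (PySem.Set.diff r [n]) <;> simp
      · simp [hn]

-- A's search is invariant under permutation of the remaining set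
theorem pvBtA_perm (f : Nat) (path : List Int) {r r' : List Int} (h : r.Perm r') :
    pvBtA f path r = pvBtA f path r' := by
  induction f generalizing path r r' with
  | zero => rfl
  | succ f ih =>
    simp only [pvBtA]
    by_cases hr : r = []
    · have hr' : r' = [] := by subst hr; exact h.symm.eq_nil
      simp [hr, hr']
    · have hr' : r' ≠ [] := fun h0 => hr ((h0 ▸ h : r.Perm []).eq_nil)
      rw [if_neg hr, if_neg hr']
      refine pvFindSome?_congr _ _ _ (fun n _ => ?_)
      have hmem : n ∈ r ↔ n ∈ r' := h.mem_iff
      by_cases hn : n ∈ r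
      · simp only [hn, hmem.mp hn, if_true]
        exact ih _ (h.filter _)
      · simp only [hn, if_false]
        rw [if_neg (fun hx => hn (hmem.mpr hx))]

-- dead-end states and the memo invariant
def pvDead (l : Int) (r : List Int) : Prop := pvBtA (r.length + 1) [l] r = none

def pvInv (memo : List (Int × List Int)) : Prop := ∀ k ∈ memo, pvDead k.1 k.2

-- a dead memo key forces A's search from the same last cell and remaining set to fail
theorem pvDead_elim (f : Nat) (rA rB : List Int) (l : Int)
    (hperm : rB.Perm rA) (hf : rA.length < f) (hd : pvDead l rB) : pvBtA f [l] rA = none := by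
  have h1 : pvBtA f [l] rB = none := by
    rw [pvBtA_fuel f (rB.length + 1) [l] rB (by rw [hperm.length_eq]; omega) (by omega)]
    exact hd
  rw [← pvBtA_perm f [l] hperm]; exact h1

theorem pvSolveB_eq (f : Nat) (l : Int) (rA rB : List Int) (memo : List (Int × List Int))
    (hperm : rB.Perm rA) (hf : rA.length < f) (hinv : pvInv memo) :
    (pvSolveB f l rB memo).1 = pvBtA f [l] rA ∧ pvInv (pvSolveB f l rB memo).2 := by
  induction f generalizing l rA rB memo with
  | zero => omega
  | succ f ih =>
    by_cases hrB : rB = []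
    · have hrA : rA = [] := by subst hrB; exact hperm.symm.eq_nil
      rw [show pvSolveB (f + 1) l rB memo = (some [l], memo) by simp [pvSolveB, hrB]]
      exact ⟨by simp [pvBtA, hrA], hinv⟩
    · have hrA : rA ≠ [] := fun h0 => hrB ((h0 ▸ hperm : rB.Perm []).eq_nil)
      by_cases hkey : (l, rB) ∈ memo
      · have hA : pvBtA (f + 1) [l] rA = none :=
          pvDead_elim (f + 1) rA rB l hperm hf (hinv _ hkey)
        rw [show pvSolveB (f + 1) l rB memo = (none, memo) by
          simp only [pvSolveB, if_neg hrB]; rw [if_pos hkey]]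
        exact ⟨hA.symm, hinv⟩
      · -- the inner loop computes A's findSome? over the same row, preserving the invariant
        have loop : ∀ (row : List Int) (m0 : List (Int × List Int)), pvInv m0 →
            (pvLoopB f l rB row m0).1 = row.findSome? (fun n =>
              if n ∈ rA then pvBtA f ([l] ++ [n]) (PySem.Set.diff rA [n]) else none) ∧
            pvInv (pvLoopB f l rB row m0).2 := by
          intro row
          induction row with
          | nil =>
            intro m0 h0
            refine ⟨by simp [pvLoopB], ?_⟩
            simpa [pvLoopB] using h0
          | cons n rest ihrow =>
            intro m0 h0
            by_cases hn : n ∈ rB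
            · have hnA : n ∈ rA := hperm.mem_iff.mp hn
              have hpermn : (rB.filter (fun x => x ≠ n)).Perm (PySem.Set.diff rA [n]) := by
                have he : rB.filter (fun x => x ≠ n) =
                    rB.filter (fun x => !([n] : List Int).contains x) := by
                  apply List.filter_congr; intro x _; simp
                rw [he]; simp only [PySem.Set.diff]; exact hperm.filter _
              have hfn : (PySem.Set.diff rA [n]).length < f := by
                have := pvDiff_length_lt hnA; omega
              obtain ⟨hbt1, hbt2⟩ := ih n (PySem.Set.diff rA [n])
                (rB.filter (fun x => x ≠ n)) m0 hpermn hfn h0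
              simp only [pvLoopB, if_pos hn, List.findSome?_cons, if_pos hnA,
                pvBtA_append f [l] n (PySem.Set.diff rA [n])]
              cases hB : pvSolveB f n (rB.filter (fun x => x ≠ n)) m0 with
              | mk o m =>
                rw [hB] at hbt1 hbt2
                cases o with
                | some sub => rw [← hbt1]; exact ⟨rfl, hbt2⟩
                | none => rw [← hbt1]; exact ihrow m hbt2
            · have hnA : n ∉ rA := fun hx => hn (hperm.mem_iff.mpr hx)
              simp only [pvLoopB, if_neg hn, List.findSome?_cons, if_neg hnA]
              exact ihrow m0 h0
        have hAeq : pvBtA (f + 1) [l] rA = (pvRow l).findSome? (fun n =>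
            if n ∈ rA then pvBtA f ([l] ++ [n]) (PySem.Set.diff rA [n]) else none) := by
          simp only [pvBtA, if_neg hrA, pvLast_single]
        obtain ⟨hV, hI⟩ := loop (pvRow l) memo hinv
        have hstep : pvSolveB (f + 1) l rB memo =
            (match pvLoopB f l rB (pvRow l) memo with
             | (some r, m) => (some r, m)
             | (none, m) => (none, (l, rB) :: m)) := by
          simp only [pvSolveB, if_neg hrB]; rw [if_neg hkey]
        cases hL : pvLoopB f l rB (pvRow l) memo with
        | mk o m =>
          rw [hL] at hV hI hstep
          cases o with
          | some r => rw [hstep]; exact ⟨by rw [hAeq, ← hV], hI⟩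
          | none =>
            rw [hstep]
            refine ⟨by rw [hAeq, ← hV], ?_⟩
            intro k hk
            rcases List.mem_cons.mp hk with hk1 | hk2
            · subst hk1
              show pvDead l rB
              unfold pvDead
              simp only [pvBtA, if_neg hrB, pvLast_single]
              apply List.findSome?_eq_none_iff.mpr
              intro n hn
              by_cases hnB : n ∈ rB
              · have hnA : n ∈ rA := hperm.mem_iff.mp hnB
                have hAn : pvBtA f ([l] ++ [n]) (PySem.Set.diff rA [n]) = none := by
                  have := List.findSome?_eq_none_iff.mp hV.symm n hn
                  simpa [hnA] using this
                have h2 : pvBtA f [n] (PySem.Set.diff rA [n]) = none := by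
                  have hm := pvBtA_append f [l] n (PySem.Set.diff rA [n])
                  rw [hAn] at hm
                  exact Option.map_eq_none_iff.mp hm.symm
                have h3 : pvBtA f [n] (PySem.Set.diff rB [n]) = none := by
                  have hm : (PySem.Set.diff rB [n]).Perm (PySem.Set.diff rA [n]) := by
                    simp only [PySem.Set.diff]; exact hperm.filter _
                  rw [pvBtA_perm f [n] hm]; exact h2
                have h4 : pvBtA rB.length [n] (PySem.Set.diff rB [n]) = none := by
                  rw [pvBtA_fuel rB.length f [n] _ (pvDiff_length_lt hnB)
                    (by have h5 := pvDiff_length_lt hnB; have h6 := hperm.length_eq; omega)]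
                  exact h3
                rw [if_pos hnB, pvBtA_append rB.length [l] n (PySem.Set.diff rB [n]), h4]
                rfl
              · rw [if_neg hnB]
            · exact hI k hk2

theorem pvStartsB_eq (starts cells : List Int) (memo : List (Int × List Int))
    (hsub : ∀ s ∈ starts, s ∈ cells) (hinv : pvInv memo) :
    pvStartsB starts (PySem.Set.ofList cells) cells.length memo =
      starts.findSome? (fun s =>
        pvBtA cells.length [s] (PySem.Set.diff (PySem.Set.ofList cells) [s])) := by
  induction starts generalizing memo with
  | nil => rfl
  | cons s rest ih =>
    have hs : s ∈ cells := hsub s (by simp)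
    have hsSet : s ∈ PySem.Set.ofList cells := (PySem.Set.mem_ofList cells s).mpr hs
    have hperm : (PySem.List.sorted (PySem.Set.diff (PySem.Set.ofList cells) [s]) (fun x => x) false).Perm
        (PySem.Set.diff (PySem.Set.ofList cells) [s]) := PySem.List.sorted_perm _ _ _
    have hf : (PySem.Set.diff (PySem.Set.ofList cells) [s]).length < cells.length := by
      have h1 := pvDiff_length_lt hsSet
      have h2' := PySem.Set.length_ofList_le cells
      omega
    have hbt := pvSolveB_eq cells.length s (PySem.Set.diff (PySem.Set.ofList cells) [s])
      (PySem.List.sorted (PySem.Set.diff (PySem.Set.ofList cells) [s]) (fun x => x) false)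
      memo hperm hf hinv
    simp only [pvStartsB, List.findSome?]
    cases hB : pvSolveB cells.length s
      (PySem.List.sorted (PySem.Set.diff (PySem.Set.ofList cells) [s]) (fun x => x) false) memo with
    | mk o m =>
      rw [hB] at hbt
      obtain ⟨hbt1, hbt2⟩ := hbt
      cases o with
      | some r => rw [← hbt1]
      | none =>
        rw [← hbt1]
        exact ih m (fun x hx => hsub x (by simp [hx])) hbt2

-- ===== VERDICT (by name: the statement is the Claim_ definition above) =====
theorem find_adjacency_order_spec : Claim_equal_find_adjacency_order := by
  intro cells _ _
  unfold Spec_find_adjacency_order find_adjacency_order find_adjacency_order_alt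
  by_cases h : cells.length ≤ 1
  · simp [h]
  · simp only [h, if_false]
    exact (pvStartsB_eq cells cells [] (fun s hs => hs) (fun k hk => by simp at hk)).symm
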